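-- pv_equiv track=rewrite | github.com/syamadusumilli/syam-publications | policy/process_articles.py | strip_article_header
-- ===== SOURCE A (Python) =====
-- def strip_article_header(full_text):
--     """Remove the H1/H2/series header from article content for Hugo.
--     Hugo renders the title from front matter, so we strip the redundant header."""
--     lines = full_text.split("\n")
--     result = []
--     past_header = False
--
--     for line in lines:
--         stripped = line.strip()
--
--         if not past_header:
--             # Skip H1 lines
--             if stripped.startswith("# ") and not stripped.startswith("## "):
--                 continue
--             # Skip H2 that is the subtitle (first H2 only)
--             if stripped.startswith("## ") and not result:
--                 continue
--             # Skip italic series line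
--             if stripped.startswith("*") and not stripped.startswith("**"):
--                 if "Series" in stripped:
--                     continue
--             # Skip separator lines
--             if stripped == "---":
--                 continue
--             # Skip empty lines before content starts
--             if not stripped:
--                 continue
--             # First real content line marks end of header
--             past_header = True
--
--         result.append(line)
--
--     return "\n".join(result)
-- ===== SOURCE B (Python) =====
-- def strip_article_header(full_text):
--     """Remove the H1/H2/series header from article content for Hugo.
--
--     B: works on the raw text, never splitting it into a list of lines:
--     repeatedly peel the first line off with str.find("\n") while it is a
--     header line, then return the remaining text (the untouched suffix of
--     full_text), so the accumulator and the final join disappear."""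
--     def is_header(s):
--         s = s.strip()
--         return (not s
--                 or s == "---"
--                 or (s.startswith("# ") and not s.startswith("## "))
--                 or s.startswith("## ")
--                 or (s.startswith("*") and not s.startswith("**") and "Series" in s))
--
--     text = full_text
--     while True:
--         i = text.find("\n")
--         head = text if i == -1 else text[:i]
--         if not is_header(head):
--             return text
--         if i == -1:
--             return ""
--         text = text[i + 1:]
-- ===== Notes on version B (the rewrite author's own statement) =====
-- stated objective: alternative
-- what changed: B never materialises the line list: it peels header lines off the raw text with str.find and string slicing and returns the remaining suffix of the original text directly, so A's past_header flag, per-line accumulator and final newline-join are all gone (valid because once content starts A keeps every line unchanged, i.e. the answer is a suffix of the input).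
import Mathlib
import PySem

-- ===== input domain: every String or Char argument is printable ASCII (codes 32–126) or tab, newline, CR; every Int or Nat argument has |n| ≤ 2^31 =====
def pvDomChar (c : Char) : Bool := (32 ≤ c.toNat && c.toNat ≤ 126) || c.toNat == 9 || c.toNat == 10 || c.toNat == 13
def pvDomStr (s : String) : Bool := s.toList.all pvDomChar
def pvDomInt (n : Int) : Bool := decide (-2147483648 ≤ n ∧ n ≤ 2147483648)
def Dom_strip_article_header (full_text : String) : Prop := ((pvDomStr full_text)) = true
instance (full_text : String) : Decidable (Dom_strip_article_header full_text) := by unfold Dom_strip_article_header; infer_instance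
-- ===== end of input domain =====

-- B peels header lines off the raw text with str.find/slicing and returns the remaining suffix,
-- instead of A's split-into-lines loop with a past_header flag, accumulator and final join (objective: alternative).

-- ===== PORT A =====
-- A's for-loop over lines with state (result, past_header), branches in source order.
def pvAloop : List String → List String → Bool → List String
  | [], result, _ => result
  | line :: rest, result, past_header =>
    let stripped := PySem.Str.strip line
    if !past_header then
      if PySem.Str.startswith stripped "# " && !PySem.Str.startswith stripped "## " then
        pvAloop rest result past_header
      else if PySem.Str.startswith stripped "## " && result.isEmpty then
        pvAloop rest result past_header
      else if PySem.Str.startswith stripped "*" && !PySem.Str.startswith stripped "**"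
              && PySem.Str.isIn "Series" stripped then
        pvAloop rest result past_header
      else if stripped == "---" then
        pvAloop rest result past_header
      else if stripped == "" then
        pvAloop rest result past_header
      else
        pvAloop rest (result ++ [line]) true
    else
      pvAloop rest (result ++ [line]) past_header

def strip_article_header (full_text : String) : String :=
  let lines := (PySem.Str.split? full_text "\n").getD []
  PySem.Str.join "\n" (pvAloop lines [] false)

-- ===== PORT B =====
-- Source B's is_header, on the code-point list (PySem.Str.* are thin wrappers over these, exact).
def pvIsHeaderL (l : List Char) : Bool :=
  let s := PySem.Chars.strip l
  s == [] || s == ['-', '-', '-']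
    || (PySem.Chars.startswith s ['#', ' '] && !PySem.Chars.startswith s ['#', '#', ' '])
    || PySem.Chars.startswith s ['#', '#', ' ']
    || (PySem.Chars.startswith s ['*'] && !PySem.Chars.startswith s ['*', '*']
        && PySem.Chars.isIn ['S', 'e', 'r', 'i', 'e', 's'] s)

-- Source B's while-loop on the raw text: text.find("\n"), text[:i], text[i+1:], ported on the
-- code-point list (exact: Chars.find/slice are the List Char forms of str.find and slicing).
def pvBloop (text : List Char) : List Char :=
  let i := PySem.Chars.find text ['\n']
  let head := if i = -1 then text else PySem.Chars.slice text none (some i)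
  if !pvIsHeaderL head then text
  else if hi : i = -1 then []
  else
    have hlt : (PySem.Chars.slice text (some (i + 1)) none).length < text.length := by
      have h0 : -1 ≤ PySem.Chars.find text ['\n'] := PySem.Chars.neg_one_le_find text ['\n']
      have hne : text ≠ [] := by
        intro he
        have := (PySem.Chars.find_ne_neg_one_iff text ['\n']).mp hi
        rw [he] at this
        simp at this
      have h1 : (0 : Int) ≤ i + 1 := by omega
      rw [PySem.Chars.slice_eq_listSlice, PySem.List.slice_from text h1]
      have : 1 ≤ (i + 1).toNat := by omega
      cases text with
      | nil => exact absurd rfl hne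
      | cons a t => simp [List.length_drop]; omega
    pvBloop (PySem.Chars.slice text (some (i + 1)) none)
termination_by text.length
decreasing_by exact hlt

def strip_article_header_alt (full_text : String) : String :=
  String.ofList (pvBloop full_text.toList)

-- ===== PRECONDITION & SPEC =====
def Spec_strip_article_header (full_text : String) (out : String) : Prop := out = strip_article_header_alt full_text
instance (full_text : String) (out : String) : Decidable (Spec_strip_article_header full_text out) := by unfold Spec_strip_article_header; infer_instance

-- ===== CLAIM (what is proved, stated in full; the proofs are below) =====
def Claim_equal_strip_article_header : Prop := ∀ (full_text : String), Dom_strip_article_header full_text → Spec_strip_article_header full_text (strip_article_header full_text)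

-- ===== LEMMAS AND PROOFS =====

-- Reference split of a char list at '\n' (structural form of Chars.splitOn · ['\n']).
def pvSplitNL : List Char → List Char → List (List Char)
  | pre, [] => [pre]
  | pre, c :: rest => if c = '\n' then pre :: pvSplitNL [] rest else pvSplitNL (pre ++ [c]) rest

-- Drop the leading run of header lines (characterises both programs' header phase).
def pvDropHdr : List (List Char) → List (List Char)
  | [] => []
  | l :: rest => if pvIsHeaderL l then pvDropHdr rest else l :: rest

-- Once past_header is set, A appends every remaining line.
theorem pvAloop_true (lines : List String) : ∀ acc, pvAloop lines acc true = acc ++ lines := by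
  induction lines with
  | nil => simp [pvAloop]
  | cons l rest ih => intro acc; simp [pvAloop, ih]

-- With an empty accumulator, A's header phase drops exactly the leading header lines.
theorem pvAloop_eq_drop (xs : List (List Char)) :
    pvAloop (xs.map String.ofList) [] false = (pvDropHdr xs).map String.ofList := by
  induction xs with
  | nil => rfl
  | cons l rest ih =>
    simp only [List.map_cons, pvAloop, pvDropHdr, pvIsHeaderL]
    by_cases h1 : PySem.Chars.startswith (PySem.Chars.strip l) ['#', ' '] = true <;>
    by_cases h2 : PySem.Chars.startswith (PySem.Chars.strip l) ['#', '#', ' '] = true <;>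
    by_cases h3 : PySem.Chars.startswith (PySem.Chars.strip l) ['*'] = true <;>
    by_cases h4 : PySem.Chars.startswith (PySem.Chars.strip l) ['*', '*'] = true <;>
    by_cases h5 : PySem.Chars.isIn ['S', 'e', 'r', 'i', 'e', 's'] (PySem.Chars.strip l) = true <;>
    by_cases h6 : PySem.Chars.strip l = ['-', '-', '-'] <;>
    by_cases h7 : PySem.Chars.strip l = [] <;>
    simp [String.ext_iff, h1, h2, h3, h4, h5, h6, h7, ih, pvAloop_true]

-- Chars.splitOn's fuel loop, specialised to the separator "\n", is pvSplitNL.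
theorem pvSplitOn_go (fuel : Nat) : ∀ (l cur : List Char) (acc : List (List Char)),
    l.length < fuel →
    PySem.Chars.splitOn.go ['\n'] fuel l cur acc = acc.reverse ++ pvSplitNL cur.reverse l := by
  induction fuel with
  | zero => intro l cur acc h; omega
  | succ n ih =>
    intro l cur acc h
    cases l with
    | nil => simp [PySem.Chars.splitOn.go, pvSplitNL]
    | cons c rest =>
      by_cases hc : c = '\n'
      · subst hc
        rw [PySem.Chars.splitOn.go]
        simp only [List.isPrefixOf, Bool.and_true, beq_self_eq_true,
          if_pos, List.length_cons, List.drop_succ_cons, List.drop_zero, List.length_nil]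
        rw [ih rest [] ((List.reverse cur) :: acc) (by simp at h ⊢; omega)]
        simp [pvSplitNL]
      · rw [PySem.Chars.splitOn.go]
        have : ['\n'].isPrefixOf (c :: rest) = false := by
          simp [List.isPrefixOf]; exact fun he => absurd he.symm hc
        rw [if_neg (by simp [this])]
        rw [ih rest (c :: cur) acc (by simp at h ⊢; omega)]
        simp [pvSplitNL, hc]

theorem pvSplitOn_eq (cs : List Char) : PySem.Chars.splitOn cs ['\n'] = pvSplitNL [] cs := by
  have := pvSplitOn_go (cs.length + 1) cs [] [] (by omega)
  simpa [PySem.Chars.splitOn] using this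

-- Chars.find of "\n" is the length of the no-newline prefix (or -1).
theorem pvFind_go (l : List Char) : ∀ (k : Nat),
    PySem.Chars.find.go ['\n'] l k =
      if '\n' ∈ l then ((k + (l.takeWhile (· ≠ '\n')).length : Nat) : Int) else -1 := by
  induction l with
  | nil => intro k; simp [PySem.Chars.find.go]
  | cons c rest ih =>
    intro k
    rw [PySem.Chars.find.go]
    by_cases hc : c = '\n'
    · subst hc
      simp [List.isPrefixOf, List.takeWhile]
    · have : ['\n'].isPrefixOf (c :: rest) = false := by
        simp [List.isPrefixOf]; exact fun he => absurd he.symm hc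
      rw [if_neg (by simp [this])]
      rw [ih (k + 1)]
      by_cases hm : '\n' ∈ rest
      · rw [if_pos hm, if_pos (List.mem_cons_of_mem c hm)]
        rw [List.takeWhile_cons_of_pos (by simp [hc])]
        push_cast
        simp
        omega
      · rw [if_neg hm, if_neg (by
          simp only [List.mem_cons, not_or]
          exact ⟨fun he => hc he.symm, hm⟩)]

theorem pvFind_eq (cs : List Char) :
    PySem.Chars.find cs ['\n'] =
      if '\n' ∈ cs then (((cs.takeWhile (· ≠ '\n')).length : Nat) : Int) else -1 := by
  have := pvFind_go cs 0
  simpa [PySem.Chars.find] using this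

theorem pvSplitNL_ne_nil (l pre : List Char) : pvSplitNL pre l ≠ [] := by
  induction l generalizing pre with
  | nil => simp [pvSplitNL]
  | cons c rest ih => by_cases hc : c = '\n' <;> simp [pvSplitNL, hc, ih]

-- Joining the split back gives the text: join "\n" (pvSplitNL pre l) = pre ++ l.
theorem pvJoin_splitNL (l : List Char) : ∀ pre,
    PySem.Chars.join ['\n'] (pvSplitNL pre l) = pre ++ l := by
  induction l with
  | nil => intro pre; simp [pvSplitNL, PySem.Chars.join_singleton]
  | cons c rest ih =>
    intro pre
    by_cases hc : c = '\n'
    · subst hc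
      rw [show pvSplitNL pre ('\n' :: rest) = pre :: pvSplitNL [] rest by simp [pvSplitNL]]
      obtain ⟨q, qs, hq⟩ := List.exists_cons_of_ne_nil (pvSplitNL_ne_nil rest [])
      rw [hq, PySem.Chars.join_cons_cons, ← hq, ih []]
      simp
    · rw [show pvSplitNL pre (c :: rest) = pvSplitNL (pre ++ [c]) rest by simp [pvSplitNL, hc]]
      rw [ih (pre ++ [c])]
      simp

-- Splitting a text whose first line is `mid`.
theorem pvSplitNL_append (mid : List Char) : ∀ (pre post : List Char),
    (∀ c ∈ mid, c ≠ '\n') →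
    pvSplitNL pre (mid ++ '\n' :: post) = (pre ++ mid) :: pvSplitNL [] post := by
  induction mid with
  | nil => intro pre post _; simp [pvSplitNL]
  | cons c rest ih =>
    intro pre post h
    have hc : c ≠ '\n' := h c (by simp)
    simp only [List.cons_append, pvSplitNL, if_neg hc]
    rw [ih (pre ++ [c]) post (fun x hx => h x (by simp [hx]))]
    simp

theorem pvSplitNL_no (l : List Char) : ∀ pre, (∀ c ∈ l, c ≠ '\n') →
    pvSplitNL pre l = [pre ++ l] := by
  induction l with
  | nil => intro pre _; simp [pvSplitNL]
  | cons c rest ih =>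
    intro pre h
    have hc : c ≠ '\n' := h c (by simp)
    simp only [pvSplitNL, if_neg hc]
    rw [ih (pre ++ [c]) (fun x hx => h x (by simp [hx]))]
    simp

-- Decompose a text containing '\n' at its first newline.
theorem pvDecomp (l : List Char) (h : '\n' ∈ l) :
    l = l.takeWhile (· ≠ '\n') ++ '\n' :: (l.dropWhile (· ≠ '\n')).tail := by
  induction l with
  | nil => simp at h
  | cons c rest ih =>
    by_cases hc : c = '\n'
    · subst hc; simp [List.takeWhile, List.dropWhile]
    · have hm : '\n' ∈ rest := by
        rcases List.mem_cons.mp h with h1 | h1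
        · exact absurd h1.symm hc
        · exact h1
      rw [List.takeWhile_cons_of_pos (by simp [hc]), List.dropWhile_cons_of_pos (by simp [hc]),
        List.cons_append]
      exact congrArg (c :: ·) (ih hm)

-- First line of pre ++ "\n" ++ tail is pre.
theorem pvTakeW (pre tail : List Char) (h : ∀ c ∈ pre, c ≠ '\n') :
    (pre ++ '\n' :: tail).takeWhile (· ≠ '\n') = pre := by
  induction pre with
  | nil => simp
  | cons c r ih =>
    rw [List.cons_append, List.takeWhile_cons_of_pos (by simp [h c (by simp)])]
    rw [ih (fun x hx => h x (by simp [hx]))]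

-- B's loop, one step at a time: last line / peel the first line.
theorem pvBloop_last (cs : List Char) (hmem : '\n' ∉ cs) :
    pvBloop cs = if pvIsHeaderL cs = true then [] else cs := by
  rw [pvBloop]
  have hfind : PySem.Chars.find cs ['\n'] = -1 := by rw [pvFind_eq, if_neg hmem]
  simp only [hfind]
  by_cases hh : pvIsHeaderL cs = true <;> simp [hh]

theorem pvBloop_step (pre tail : List Char) (hpre : ∀ c ∈ pre, c ≠ '\n') :
    pvBloop (pre ++ '\n' :: tail)
      = if pvIsHeaderL pre = true then pvBloop tail else pre ++ '\n' :: tail := by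
  have hmem : '\n' ∈ pre ++ '\n' :: tail := by simp
  have hfind : PySem.Chars.find (pre ++ '\n' :: tail) ['\n'] = (pre.length : Int) := by
    rw [pvFind_eq, if_pos hmem, pvTakeW pre tail hpre]
  have hsh : PySem.Chars.slice (pre ++ '\n' :: tail) none (some (pre.length : Int)) = pre := by
    rw [PySem.Chars.slice_eq_listSlice, PySem.List.slice_to _ (by omega), Int.toNat_natCast,
      List.take_append_of_le_length le_rfl, List.take_length]
  have hst : PySem.Chars.slice (pre ++ '\n' :: tail) (some ((pre.length : Int) + 1)) none = tail := by
    rw [PySem.Chars.slice_eq_listSlice, PySem.List.slice_from _ (by omega),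
      show ((pre.length : Int) + 1).toNat = pre.length + 1 by omega,
      show pre ++ '\n' :: tail = (pre ++ ['\n']) ++ tail by simp,
      List.drop_append_of_le_length (by simp)]
    simp
  rw [pvBloop]
  simp only [hfind, hsh, hst]
  rw [if_neg (show ¬((pre.length : Int) = -1) by omega)]
  by_cases hh : pvIsHeaderL pre = true
  · rw [if_neg (show ¬((!pvIsHeaderL pre) = true) by simp [hh]),
        dif_neg (show ¬((pre.length : Int) = -1) by omega), if_pos hh]
  · rw [if_pos (show (!pvIsHeaderL pre) = true by simp [hh]), if_neg hh]

-- MAIN: dropping the leading header lines of the split and re-joining IS B's suffix loop.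
theorem pvMain (n : Nat) : ∀ (cs : List Char), cs.length ≤ n →
    PySem.Chars.join ['\n'] (pvDropHdr (pvSplitNL [] cs)) = pvBloop cs := by
  induction n with
  | zero =>
    intro cs h
    have hcs : cs = [] := by cases cs <;> simp at h ⊢
    subst hcs
    rw [pvBloop_last [] (by simp)]
    by_cases hh : pvIsHeaderL [] = true <;>
      simp [pvSplitNL, pvDropHdr, hh, PySem.Chars.join, List.intercalate]
  | succ n ih =>
    intro cs hlen
    by_cases hmem : '\n' ∈ cs
    · obtain ⟨pre, tail, hprenl, hdec⟩ :
        ∃ pre tail, (∀ c ∈ pre, c ≠ '\n') ∧ cs = pre ++ '\n' :: tail := by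
        refine ⟨cs.takeWhile (· ≠ '\n'), (cs.dropWhile (· ≠ '\n')).tail, ?_, pvDecomp cs hmem⟩
        intro c hc
        have := List.mem_takeWhile_imp hc
        simpa using this
      subst hdec
      have hsplit : pvSplitNL [] (pre ++ '\n' :: tail) = pre :: pvSplitNL [] tail := by
        rw [pvSplitNL_append pre [] tail hprenl]
        simp
      have htail_len : tail.length ≤ n := by
        simp [List.length_append] at hlen
        omega
      rw [hsplit, pvBloop_step pre tail hprenl]
      by_cases hh : pvIsHeaderL pre = true
      · rw [if_pos hh]
        rw [show pvDropHdr (pre :: pvSplitNL [] tail) = pvDropHdr (pvSplitNL [] tail) by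
          simp [pvDropHdr, hh]]
        exact ih tail htail_len
      · rw [if_neg hh]
        rw [show pvDropHdr (pre :: pvSplitNL [] tail) = pre :: pvSplitNL [] tail by
          simp [pvDropHdr, hh]]
        obtain ⟨q, qs, hq⟩ := List.exists_cons_of_ne_nil (pvSplitNL_ne_nil tail [])
        rw [hq, PySem.Chars.join_cons_cons, ← hq, pvJoin_splitNL tail []]
        simp
    · have hno : ∀ c ∈ cs, c ≠ '\n' := fun c hc he => hmem (he ▸ hc)
      rw [pvSplitNL_no cs [] hno, pvBloop_last cs hmem]
      by_cases hh : pvIsHeaderL cs = true <;>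
        simp [pvDropHdr, hh, PySem.Chars.join, List.intercalate]

-- A's line list is the reference split, as strings.
theorem pvLines_eq (s : String) :
    (PySem.Str.split? s "\n").getD [] = (pvSplitNL [] s.toList).map String.ofList := by
  have h := PySem.Str.split?_map s "\n"
  have hsep : ("\n" : String).toList = ['\n'] := by decide
  rw [hsep] at h
  rw [show PySem.Chars.split? s.toList ['\n'] = some (PySem.Chars.splitOn s.toList ['\n']) by
    simp [PySem.Chars.split?]] at h
  cases hs : PySem.Str.split? s "\n" with
  | none => rw [hs] at h; simp at h
  | some L =>
    rw [hs] at h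
    simp only [Option.map_some, Option.some.injEq] at h
    rw [pvSplitOn_eq] at h
    simp only [Option.getD_some]
    rw [← h]
    simp [List.map_map, Function.comp_def]

-- ===== VERDICT (by name: the statement is the Claim_ definition above) =====
theorem strip_article_header_spec : Claim_equal_strip_article_header := by
  intro s _
  unfold Spec_strip_article_header strip_article_header strip_article_header_alt
  simp only [pvLines_eq, pvAloop_eq_drop]
  apply String.toList_inj.mp
  rw [PySem.Str.toList_join]
  rw [show ("\n" : String).toList = ['\n'] by decide]
  rw [List.map_map]
  rw [show (String.toList ∘ String.ofList) = id by funext l; simp]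
  rw [List.map_id]
  rw [pvMain (s.toList.length) s.toList le_rfl]
  simp
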